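-- pv_equiv track=rewrite | github.com/badaix/snapcast | server/etc/plug-ins/meta_mpd.py | __diff_map
-- ===== SOURCE A (Python) =====
-- def __diff_map(old_map, new_map):
--     diff = {}
--     for key, value in new_map.items():
--         if not key in old_map:
--             diff[key] = [None, value]
--         elif value != old_map[key]:
--             diff[key] = [old_map[key], value]
--     for key, value in old_map.items():
--         if not key in new_map:
--             diff[key] = [value, None]
--     return diff
-- ===== SOURCE B (Python) =====
-- def __diff_map(old_map, new_map):
--     # Detect every added/removed/changed key in one set operation: the symmetric
--     # difference of the items views contains exactly the (key, value) pairs that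
--     # occur in one map but not the other.
--     touched = {key for key, _ in old_map.items() ^ new_map.items()}
--     diff = {key: [old_map.get(key), value]
--             for key, value in new_map.items() if key in touched}
--     diff.update((key, [value, None])
--                 for key, value in old_map.items() if key not in new_map)
--     return diff
-- ===== Notes on version B (the rewrite author's own statement) =====
-- stated objective: alternative
-- what changed: A classifies keys with two branching passes (membership tests and value comparisons) that mutate a diff dict; B instead detects every added/removed/changed key at once by taking the set symmetric difference of the two items views (hash-set algebra on (key,value) pairs, no explicit value comparison), then materialises the entries with a dict comprehension filtered by that touched set plus an update for removed keys.
import Mathlib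
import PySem

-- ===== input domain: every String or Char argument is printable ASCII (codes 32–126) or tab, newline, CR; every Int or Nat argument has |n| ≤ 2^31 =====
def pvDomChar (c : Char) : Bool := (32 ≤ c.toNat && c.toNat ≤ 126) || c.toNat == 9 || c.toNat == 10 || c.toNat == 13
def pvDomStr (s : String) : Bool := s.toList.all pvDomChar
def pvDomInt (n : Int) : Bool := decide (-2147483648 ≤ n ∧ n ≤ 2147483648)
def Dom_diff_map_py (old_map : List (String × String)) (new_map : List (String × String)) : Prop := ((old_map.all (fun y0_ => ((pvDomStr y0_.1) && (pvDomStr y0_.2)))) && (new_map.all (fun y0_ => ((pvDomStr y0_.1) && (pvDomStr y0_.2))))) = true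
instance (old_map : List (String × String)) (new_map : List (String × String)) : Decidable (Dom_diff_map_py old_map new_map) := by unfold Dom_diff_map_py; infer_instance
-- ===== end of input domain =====

-- B replaces A's two branching passes by set algebra: the symmetric difference of the
-- items views detects every added/removed/changed key at once; same cost, different algorithm.

-- ===== PORT A =====
-- Python A: loop over new_map.items() adding added/changed keys, then loop over
-- old_map.items() adding removed keys. The dict arguments are the association lists
-- read as PySem.Dict (insertion order, overwrite in place).
def diff_map_py (old_map : List (String × String)) (new_map : List (String × String)) : List (String × List (Option String)) :=
  let od := PySem.Dict.ofList old_map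
  let nd := PySem.Dict.ofList new_map
  let diff : PySem.Dict String (List (Option String)) := PySem.Dict.empty
  -- for key, value in new_map.items(): …
  let diff := nd.items.foldl (fun d p =>
    if od.contains p.1 = false then d.insert p.1 [none, some p.2]
    else match od.get? p.1 with          -- old_map[key]; `none` unreachable here (contains is true)
      | some w => if p.2 ≠ w then d.insert p.1 [some w, some p.2] else d
      | none => d) diff
  -- for key, value in old_map.items(): …
  let diff := od.items.foldl (fun d p =>
    if nd.contains p.1 = false then d.insert p.1 [some p.2, none] else d) diff
  diff.items

-- ===== PORT B =====
-- B: touched = {key for key, _ in old_map.items() ^ new_map.items()} — set symmetric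
-- difference of the items views; then a dict comprehension over new_map filtered by
-- `touched` (old_map.get(key) is exactly od.get?), and diff.update(…) for removed keys.
def diff_map_py_alt (old_map : List (String × String)) (new_map : List (String × String)) : List (String × List (Option String)) :=
  let od := PySem.Dict.ofList old_map
  let nd := PySem.Dict.ofList new_map
  let touched : PySem.Set String :=
    PySem.Set.ofList ((PySem.Set.symmDiff (PySem.Set.ofList od.items) (PySem.Set.ofList nd.items)).map (·.1))
  -- diff = {key: [old_map.get(key), value] for key, value in new_map.items() if key in touched}
  let diff := PySem.Dict.ofList (nd.items.filterMap (fun p =>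
    if touched.contains p.1 then some (p.1, [od.get? p.1, some p.2]) else none))
  -- diff.update((key, [value, None]) for key, value in old_map.items() if key not in new_map)
  let diff := diff.update (od.items.filterMap (fun p =>
    if nd.contains p.1 then none else some (p.1, [some p.2, none])))
  diff.items

-- ===== PRECONDITION & SPEC =====
def Spec_diff_map_py (old_map : List (String × String)) (new_map : List (String × String)) (out : List (String × List (Option String))) : Prop := out = diff_map_py_alt old_map new_map
instance (old_map : List (String × String)) (new_map : List (String × String)) (out : List (String × List (Option String))) : Decidable (Spec_diff_map_py old_map new_map out) := by unfold Spec_diff_map_py; infer_instance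

-- ===== CLAIM (what is proved, stated in full; the proofs are below) =====
def Claim_equal_diff_map_py : Prop := ∀ (old_map : List (String × String)) (new_map : List (String × String)), Dom_diff_map_py old_map new_map → Spec_diff_map_py old_map new_map (diff_map_py old_map new_map)

-- ===== LEMMAS AND PROOFS =====

-- A skip-or-insert loop over pairs with distinct keys, whose hits are fresh for d, appends its hits.
lemma foldl_insert_opt_items {ν : Type}
    (g : PySem.Dict String ν → String × String → PySem.Dict String ν)
    (f : String × String → Option ν)
    (hg : ∀ d p, g d p = match f p with | some v => d.insert p.1 v | none => d)
    (l : List (String × String)) (d : PySem.Dict String ν)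
    (hfresh : ∀ p ∈ l, f p ≠ none → d.contains p.1 = false)
    (hnd : (l.map (·.1)).Nodup) :
    (l.foldl g d).items = d.items ++ l.filterMap (fun p => (f p).map (fun v => (p.1, v))) := by
  induction l generalizing d with
  | nil => simp
  | cons p rest ih =>
    simp only [List.map_cons, List.nodup_cons, List.mem_map] at hnd
    simp only [List.foldl_cons, hg]
    cases hf : f p with
    | none =>
      rw [ih d (fun q hq hfq => hfresh q (by simp [hq]) hfq) hnd.2]
      simp [hf]
    | some v =>
      have hp : d.contains p.1 = false := hfresh p (by simp) (by simp [hf])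
      rw [ih (d.insert p.1 v) ?_ hnd.2]
      · rw [PySem.Dict.items_insert_of_not_contains d v hp]
        simp [hf]
      · intro q hq hfq
        rw [PySem.Dict.contains_insert]
        have hne : q.1 ≠ p.1 := fun h => hnd.1 ⟨q, hq, h⟩
        simp [hne, hfresh q (by simp [hq]) hfq]

lemma get?_of_contains {ν : Type} (d : PySem.Dict String ν) (k : String) (dflt : ν)
    (h : d.contains k = true) : d.get? k = some (d.getD k dflt) := by
  cases hg : d.get? k with
  | none => rw [PySem.Dict.get?_eq_none_iff_contains] at hg; simp [h] at hg
  | some w => rw [PySem.Dict.getD_of_get?_eq_some d dflt hg]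

lemma get?_of_not_contains {ν : Type} (d : PySem.Dict String ν) (k : String)
    (h : d.contains k = false) : d.get? k = none := by
  rw [PySem.Dict.get?_eq_none_iff_contains]; simp [h]

-- keys of a key-preserving filterMap stay nodup, and stay inside the source keys
lemma keys_filterMap_sub {γ : Type} (l : List (String × String))
    (g : String × String → Option (String × γ))
    (hg : ∀ p q, g p = some q → q.1 = p.1) :
    ∀ k, k ∈ (l.filterMap g).map (·.1) → k ∈ l.map (·.1) := by
  intro k hk
  simp only [List.mem_map, List.mem_filterMap] at hk ⊢
  obtain ⟨q, ⟨p, hp, hpq⟩, hqk⟩ := hk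
  exact ⟨p, hp, by rw [← hqk, hg p q hpq]⟩

lemma nodup_keys_filterMap {γ : Type} (l : List (String × String))
    (g : String × String → Option (String × γ))
    (hg : ∀ p q, g p = some q → q.1 = p.1)
    (h : (l.map (·.1)).Nodup) : ((l.filterMap g).map (·.1)).Nodup := by
  induction l with
  | nil => simp
  | cons p rest ih =>
    simp only [List.map_cons, List.nodup_cons] at h
    cases hgp : g p with
    | none => simpa [hgp] using ih h.2
    | some q =>
      simp only [List.filterMap_cons, hgp, List.map_cons, List.nodup_cons]
      refine ⟨fun hmem => ?_, ih h.2⟩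
      have := keys_filterMap_sub rest g hg q.1 hmem
      rw [hg p q hgp] at this
      exact h.1 this

-- the `touched` set of B holds a key of new_map iff A would record that key in its first loop
lemma touched_char (od nd : PySem.Dict String String)
    (hodn : od.keys.Nodup) (hndn : nd.keys.Nodup)
    (p : String × String) (hp : p ∈ nd.items) :
    (PySem.Set.contains (PySem.Set.ofList
        ((PySem.Set.symmDiff (PySem.Set.ofList od.items) (PySem.Set.ofList nd.items)).map (·.1))) p.1 = true)
      ↔ od.get? p.1 ≠ some p.2 := by
  have hodi : od.items.Nodup := (List.Nodup.of_map _ hodn)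
  have hndi : nd.items.Nodup := (List.Nodup.of_map _ hndn)
  have hmem : ∀ (s : PySem.Set String) (x : String), PySem.Set.contains s x = true ↔ x ∈ s := by
    intro s x; simp [PySem.Set.contains]
  have hmem2 : ∀ (s : PySem.Set (String × String)) (x : String × String),
      PySem.Set.contains s x = true ↔ x ∈ s := by
    intro s x; simp [PySem.Set.contains]
  rw [PySem.Set.ofList_eq_self_of_nodup _ hodi, PySem.Set.ofList_eq_self_of_nodup _ hndi,
      hmem, PySem.Set.mem_ofList]
  simp only [PySem.Set.symmDiff, PySem.Set.diff, List.mem_map, List.mem_append,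
    List.mem_filter, Bool.not_eq_eq_eq_not, Bool.not_true, ← Bool.not_eq_true, hmem2]
  constructor
  · rintro ⟨q, hq, hqk⟩ heq
    rcases hq with ⟨hqo, hqn⟩ | ⟨hqn, hqo⟩
    · -- q ∈ old only; but then od.get? p.1 = some p.2 forces q = p ∈ nd.items
      have h1 : od.get? q.1 = some q.2 := PySem.Dict.get?_of_mem_items od hqo hodn
      rw [hqk, heq] at h1
      have hq2 : q.2 = p.2 := by injection h1 with h; exact h.symm
      exact hqn ((Prod.ext hqk hq2) ▸ hp)
    · -- q ∈ new only; keys of nd are unique, so q = p, contradicting q ∉ od.items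
      have h1 : nd.get? q.1 = some q.2 := PySem.Dict.get?_of_mem_items nd hqn hndn
      have h2 : nd.get? p.1 = some p.2 := PySem.Dict.get?_of_mem_items nd hp hndn
      rw [hqk, h2] at h1
      have hq2 : q.2 = p.2 := by injection h1 with h; exact h.symm
      exact hqo ((Prod.ext hqk hq2) ▸ PySem.Dict.mem_items_of_get?_eq_some od heq)
  · intro hne
    refine ⟨p, Or.inr ⟨hp, fun hmemo => hne (PySem.Dict.get?_of_mem_items od hmemo hodn)⟩, rfl⟩

theorem diff_map_py_spec : Claim_equal_diff_map_py := by
  intro old_map new_map _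
  unfold Spec_diff_map_py diff_map_py diff_map_py_alt
  simp only []
  set od := PySem.Dict.ofList old_map with hod
  set nd := PySem.Dict.ofList new_map with hnd
  have odnd : od.keys.Nodup := PySem.Dict.nodup_keys_ofList old_map
  have ndnd : nd.keys.Nodup := PySem.Dict.nodup_keys_ofList new_map
  -- ==== A's side: its two loops append their hits ====
  set f1 : String × String → Option (List (Option String)) := fun p =>
    match od.get? p.1 with
    | none => some [none, some p.2]
    | some w => if p.2 ≠ w then some [some w, some p.2] else none with hf1
  set f2 : String × String → Option (List (Option String)) := fun p =>
    if nd.contains p.1 = false then some [some p.2, none] else none with hf2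
  set d1 := nd.items.foldl (fun d p =>
    if od.contains p.1 = false then d.insert p.1 [none, some p.2]
    else match od.get? p.1 with
      | some w => if p.2 ≠ w then d.insert p.1 [some w, some p.2] else d
      | none => d) PySem.Dict.empty with hd1
  have h1 : d1.items = [] ++ nd.items.filterMap (fun p => (f1 p).map (fun v => (p.1, v))) :=
    foldl_insert_opt_items _ f1
      (by
        intro d p
        by_cases hc : od.contains p.1 = true
        · have hw := get?_of_contains od p.1 "" hc
          by_cases h : p.2 = od.getD p.1 "" <;> simp [hf1, hw, hc, h]
        · have hc' : od.contains p.1 = false := by simpa using hc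
          simp [hf1, hc', get?_of_not_contains od p.1 hc'])
      nd.items PySem.Dict.empty
      (by intro p _ _; simp [PySem.Dict.contains_empty])
      ndnd
  have hkeys1 : ∀ k, k ∈ d1.keys → k ∈ nd.keys := by
    intro k hk
    have hm : k ∈ d1.items.map (·.1) := hk
    rw [h1, List.nil_append] at hm
    simp only [List.mem_map, List.mem_filterMap] at hm
    obtain ⟨q, ⟨r, hr, hrq⟩, hqk⟩ := hm
    have hq1 : q.1 = r.1 := by
      cases hg : f1 r <;> simp [hg] at hrq
      subst hrq; rfl
    rw [← hqk, hq1]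
    exact PySem.Dict.mem_keys_of_mem_items nd hr
  have h2 : (od.items.foldl (fun d p =>
      if nd.contains p.1 = false then d.insert p.1 [some p.2, none] else d) d1).items
      = d1.items ++ od.items.filterMap (fun p => (f2 p).map (fun v => (p.1, v))) :=
    foldl_insert_opt_items _ f2
      (by intro d p; simp only [hf2]; split_ifs <;> simp)
      od.items d1
      (by
        intro p hp hf
        simp only [hf2] at hf
        by_cases hc : nd.contains p.1 = false
        · by_contra h
          have hc1 : d1.contains p.1 = true := by simpa using h
          have := hkeys1 p.1 ((PySem.Dict.contains_iff_mem_keys d1 p.1).mp hc1)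
          rw [← PySem.Dict.contains_iff_mem_keys] at this
          simp [this] at hc
        · simp [by simpa using hc] at hf)
      odnd
  rw [h2, h1, List.nil_append]
  -- ==== B's side: the comprehension then the update append their pairs ====
  set touched : PySem.Set String :=
    PySem.Set.ofList ((PySem.Set.symmDiff (PySem.Set.ofList od.items) (PySem.Set.ofList nd.items)).map (·.1)) with htouched
  set g1 : String × String → Option (String × List (Option String)) := fun p =>
    if touched.contains p.1 then some (p.1, [od.get? p.1, some p.2]) else none with hg1
  set g2 : String × String → Option (String × List (Option String)) := fun p =>
    if nd.contains p.1 then none else some (p.1, [some p.2, none]) with hg2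
  have hg1key : ∀ p q, g1 p = some q → q.1 = p.1 := by
    intro p q h; simp only [hg1] at h; split_ifs at h
    injection h with h2; rw [← h2]
  have hg2key : ∀ p q, g2 p = some q → q.1 = p.1 := by
    intro p q h; simp only [hg2] at h; split_ifs at h
    injection h with h2; rw [← h2]
  set part1 := nd.items.filterMap g1 with hpart1
  set part2 := od.items.filterMap g2 with hpart2
  have hB1 : (PySem.Dict.ofList part1).items = part1 := by
    have := PySem.Dict.items_foldl_insert_fresh (d := (PySem.Dict.empty : PySem.Dict String (List (Option String))))
      (l := part1) (k := (·.1)) (v := (·.2))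
      (by intro a _; simp [PySem.Dict.contains_empty])
      (nodup_keys_filterMap nd.items g1 hg1key ndnd)
    simpa using this
  have hB2 : ((PySem.Dict.ofList part1).update part2).items = part1 ++ part2 := by
    have := PySem.Dict.items_foldl_insert_fresh (d := PySem.Dict.ofList part1)
      (l := part2) (k := (·.1)) (v := (·.2))
      (by
        intro a ha
        by_contra h
        have hc : (PySem.Dict.ofList part1).contains a.1 = true := by simpa using h
        have hk : a.1 ∈ (PySem.Dict.ofList part1).keys :=
          (PySem.Dict.contains_iff_mem_keys _ _).mp hc
        have hk1 : a.1 ∈ part1.map (·.1) := by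
          have : (PySem.Dict.ofList part1).keys = part1.map (·.1) := by
            simp [PySem.Dict.keys, hB1]
          rwa [this] at hk
        have hkn : a.1 ∈ nd.items.map (·.1) := keys_filterMap_sub nd.items g1 hg1key a.1 hk1
        -- but a came from g2, so nd.contains a.1 = false
        simp only [hpart2, List.mem_filterMap] at ha
        obtain ⟨p, hp, hpa⟩ := ha
        simp only [hg2] at hpa
        split_ifs at hpa with hcnd
        have : a.1 = p.1 := by injection hpa with h2; rw [← h2]
        rw [this] at hkn
        exact hcnd ((PySem.Dict.contains_iff_mem_keys nd p.1).mpr hkn))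
      (nodup_keys_filterMap od.items g2 hg2key odnd)
    simpa [hB1] using this
  rw [hB2]
  -- ==== the two sides agree pointwise ====
  congr 1
  · apply List.filterMap_congr
    intro p hp
    have ht := touched_char od nd odnd ndnd p hp
    have hcm : ∀ x, (PySem.Set.contains touched x = true) ↔ x ∈ touched := by
      intro x; simp [PySem.Set.contains]
    simp only [hg1, hf1]
    cases hgo : od.get? p.1 with
    | none =>
      have h1 : touched.contains p.1 = true := ht.mpr (by simp [hgo])
      have h2 : p.1 ∈ touched := (hcm _).mp h1
      simp [h2]
    | some w =>
      rcases eq_or_ne p.2 w with h | h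
      · have h1 : ¬ touched.contains p.1 = true := fun hc => (ht.mp hc) (by rw [hgo, h])
        have h2 : ¬ p.1 ∈ touched := fun hm => h1 ((hcm _).mpr hm)
        simp [h2, h]
      · have hne : od.get? p.1 ≠ some p.2 := by
          rw [hgo]; intro hx
          exact h (by injection hx with h2; exact h2.symm)
        have h1 : touched.contains p.1 = true := ht.mpr hne
        have h2 : p.1 ∈ touched := (hcm _).mp h1
        simp [h2, h]
  · apply List.filterMap_congr
    intro p hp
    simp only [hg2, hf2]
    by_cases hc : nd.contains p.1 = true <;> simp [hc]
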